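-- pv_equiv track=rewrite | github.com/fparrel/wwsupdb | text_utils.py | remove_tokens
-- ===== SOURCE A (Python) =====
-- def remove_tokens(s,tokens):
--     for token in tokens:
--         i = 0
--         while i>-1:
--             #i = unicode(s).find(unicode(token,encoding='utf8'))
--             i = s.find(token)
--             if i>-1:
--                 s=s[:i]+s[i+len(token):]
--     return s
-- ===== SOURCE B (Python) =====
-- def remove_tokens(s, tokens):
--     # One stack pass per token: push characters, pop the token whenever it
--     # appears as the stack's suffix (this catches cascaded occurrences);
--     # tokens not present in the current string are skipped.
--     for token in tokens:
--         if token and token in s: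
--             m = len(token)
--             lt = list(token)
--             last = token[-1]
--             stack = []
--             for c in s:
--                 stack.append(c)
--                 if c == last and stack[-m:] == lt:
--                     del stack[-m:]
--             s = ''.join(stack)
--     return s
-- ===== Notes on version B (the rewrite author's own statement) =====
-- stated objective: alternative
-- what changed: A repeatedly re-scans the string with s.find and cuts one occurrence per pass; B makes a single left-to-right stack pass per token (skipping tokens not present), popping the token whenever it appears as the stack's suffix, which removes cascaded occurrences in one pass.
import Mathlib
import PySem

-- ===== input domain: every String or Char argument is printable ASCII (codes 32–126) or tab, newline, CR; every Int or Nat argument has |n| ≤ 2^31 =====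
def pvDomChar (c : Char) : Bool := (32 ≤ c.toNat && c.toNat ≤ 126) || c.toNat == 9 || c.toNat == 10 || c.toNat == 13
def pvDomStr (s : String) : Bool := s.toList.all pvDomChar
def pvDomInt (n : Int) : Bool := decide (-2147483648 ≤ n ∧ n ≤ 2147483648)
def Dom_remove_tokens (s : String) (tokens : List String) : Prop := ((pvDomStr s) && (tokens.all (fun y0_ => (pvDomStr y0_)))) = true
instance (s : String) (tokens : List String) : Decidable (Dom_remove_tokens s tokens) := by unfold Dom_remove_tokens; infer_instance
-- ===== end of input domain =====

-- B replaces A's repeated find-and-cut passes by one stack pass per token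
-- (pop the token whenever it is the stack's suffix), skipping absent tokens;
-- objective: alternative (a genuinely different single-pass algorithm per token).

-- ===== PORT A =====
-- A's inner 'while' loop: find the token, cut it out, repeat until find = -1.
-- The fuel argument is only a totality guard (each removal shortens s, so
-- s.length + 1 steps suffice whenever the token is nonempty).
def removeLoopA (token : List Char) : Nat → List Char → List Char
  | 0, s => s
  | fuel + 1, s =>
    let i := PySem.Chars.find s token
    if i > -1 then
      removeLoopA token fuel
        (PySem.List.slice s none (some i) ++
         PySem.List.slice s (some (i + (token.length : Int))) none)
    else s

def remove_tokens (s : String) (tokens : List String) : String :=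
  String.ofList (tokens.foldl (fun cs token => removeLoopA token.toList (cs.length + 1) cs) s.toList)

-- ===== PORT B =====
-- Source B's inner loop: push each char; when the pushed char equals the token's
-- last char and the stack's last |token| entries equal the token, delete them.
def scanB (t : List Char) (last : Char) : List Char → List Char → List Char
  | stack, [] => stack
  | stack, c :: rest =>
    let st := stack ++ [c]
    if c == last && PySem.List.slice st (some (-(t.length : Int))) none == t then
      scanB t last (PySem.List.slice st none (some (-(t.length : Int)))) rest
    else
      scanB t last st rest

-- Source B's outer loop: 'if token and token in s' skips empty and absent tokens
def remove_tokens_alt (s : String) (tokens : List String) : String :=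
  String.ofList (tokens.foldl
    (fun cs token =>
      if h : token.toList ≠ [] ∧ PySem.Chars.isIn token.toList cs = true then
        scanB token.toList (token.toList.getLast h.1) [] cs
      else cs)
    s.toList)

-- ===== PRECONDITION & SPEC =====
-- Pre_ excludes an empty-string token, on which A's 'while s.find(token) > -1'
-- loop never terminates (find('') is always 0 and the removal is a no-op).
def Pre_remove_tokens (s : String) (tokens : List String) : Prop :=
  ∀ t ∈ tokens, t ≠ ""
instance (s : String) (tokens : List String) : Decidable (Pre_remove_tokens s tokens) := by
  unfold Pre_remove_tokens; infer_instance

def pvWitness_remove_tokens : String × List String := ("abcbcaa", ["bc", "a"])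

def Spec_remove_tokens (s : String) (tokens : List String) (out : String) : Prop := out = remove_tokens_alt s tokens
instance (s : String) (tokens : List String) (out : String) : Decidable (Spec_remove_tokens s tokens out) := by unfold Spec_remove_tokens; infer_instance

-- ===== CLAIM (what is proved, stated in full; the proofs are below) =====
def Claim_equal_remove_tokens : Prop := ∀ (s : String) (tokens : List String), Dom_remove_tokens s tokens → Pre_remove_tokens s tokens → Spec_remove_tokens s tokens (remove_tokens s tokens)

-- ===== LEMMAS AND PROOFS =====

-- The pop test of scanB on stack ++ [c] is exactly "t is a suffix".
theorem popCond_iff (t : List Char) (ht : t ≠ []) (stack : List Char) (c : Char) :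
    ((c == t.getLast ht) &&
      (PySem.List.slice (stack ++ [c]) (some (-(t.length : Int))) none == t)) = true
      ↔ t <:+ stack ++ [c] := by
  have hm : 0 < t.length := List.length_pos_iff.mpr ht
  rw [PySem.List.slice_from_neg_natCast (stack ++ [c]) t.length hm]
  simp only [Bool.and_eq_true, beq_iff_eq]
  constructor
  · rintro ⟨-, h2⟩
    exact h2 ▸ List.drop_suffix _ _
  · intro h
    obtain ⟨p, hp⟩ := h
    constructor
    · -- the pushed char is t's last char
      have h1 : (p ++ t).getLast? = some (t.getLast ht) := by
        rw [List.getLast?_append_of_ne_nil _ ht, List.getLast?_eq_some_getLast ht]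
      rw [hp, List.getLast?_concat] at h1
      exact Option.some_inj.mp h1
    · -- the stack's last |t| entries are t
      have hlen : (stack ++ [c]).length - t.length = p.length := by
        have := congrArg List.length hp
        simp at this ⊢; omega
      rw [hlen, ← hp, List.drop_left]

-- "no prefix of u ends with t" lets scanB swallow u without popping
theorem scanB_clean (t : List Char) (ht : t ≠ []) :
    ∀ (u stack v : List Char),
      (∀ p, p <+: (stack ++ u) → ¬ t <:+ p) →
      scanB t (t.getLast ht) stack (u ++ v) = scanB t (t.getLast ht) (stack ++ u) v := by
  intro u
  induction u with
  | nil => intro stack v _; simp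
  | cons c u ih =>
    intro stack v hclean
    have hnot : ¬ (((c == t.getLast ht) &&
        (PySem.List.slice (stack ++ [c]) (some (-(t.length : Int))) none == t)) = true) := by
      rw [popCond_iff t ht]
      apply hclean
      exact ⟨u, by rw [List.append_assoc, List.singleton_append]⟩
    show scanB t (t.getLast ht) stack (c :: (u ++ v)) = _
    rw [scanB, if_neg hnot]
    have := ih (stack ++ [c]) v (by
      intro p hp
      apply hclean
      have he : (stack ++ [c]) ++ u = stack ++ c :: u := by
        rw [List.append_assoc, List.singleton_append]
      exact he ▸ hp)
    simpa using this

theorem scanB_no_occ (t : List Char) (ht : t ≠ []) (s : List Char)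
    (h : ¬ t <:+: s) : scanB t (t.getLast ht) [] s = s := by
  have := scanB_clean t ht s [] [] (by
    intro p hp hts
    rw [List.nil_append] at hp
    exact h (hts.isInfix.trans hp.isInfix))
  simpa using this

-- removing the FIRST occurrence of t commutes with the stack scan
theorem scanB_remove_first (t : List Char) (ht : t ≠ []) (s : List Char) (k : Nat)
    (hk : t <+: s.drop k) (hfirst : ∀ j < k, ¬ t <+: s.drop j) :
    scanB t (t.getLast ht) [] s = scanB t (t.getLast ht) [] (s.take k ++ s.drop (k + t.length)) := by
  -- decompose s = u ++ t ++ v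
  have hkle : k ≤ s.length := by
    by_contra h
    rw [Nat.not_le] at h
    have : s.drop k = [] := List.drop_eq_nil_of_le (by omega)
    rw [this] at hk
    exact ht (List.prefix_nil.mp hk)
  obtain ⟨v, hv⟩ := hk
  have hvdef : s.drop (k + t.length) = v := by
    have h2 := congrArg (List.drop t.length) hv
    simp [List.drop_drop] at h2
    first
    | exact h2
    | exact h2.symm
  set u := s.take k with hu
  have hs : s = u ++ t ++ v := by
    have h1 : s = u ++ s.drop k := (List.take_append_drop k s).symm
    rw [h1, ← hv, List.append_assoc]
  have hulen : u.length = k := by simp [hu, hkle]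
  -- peel the last char of t
  obtain ⟨t0, c, ht0⟩ : ∃ t0 c, t = t0 ++ [c] := by
    rcases List.eq_nil_or_concat t with h | ⟨t0, c, h⟩
    · exact absurd h ht
    · exact ⟨t0, c, by simpa [List.concat_eq_append] using h⟩
  have htlen : 0 < t.length := List.length_pos_iff.mpr ht
  -- cleanliness of u ++ t0 (hence of u)
  have hclean : ∀ p, p <+: (u ++ t0) → ¬ t <:+ p := by
    intro p hp htp
    obtain ⟨q, hq⟩ := htp
    have hps : p <+: s := hp.trans (by
      refine ⟨[c] ++ v, ?_⟩
      rw [hs, ht0]; simp)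
    have hplen : p.length ≤ k + t.length - 1 := by
      have := hp.length_le
      have : p.length ≤ u.length + t0.length := by simpa using this
      have ht0len : t0.length = t.length - 1 := by
        have := congrArg List.length ht0
        simp at this; omega
      omega
    have hplen' : t.length ≤ p.length := by
      have := congrArg List.length hq
      simp at this; omega
    -- t occurs at index p.length - t.length < k : contradiction with hfirst
    obtain ⟨r, hr⟩ := hps
    have : t <+: s.drop q.length := by
      refine ⟨r, ?_⟩
      rw [← hr, ← hq]
      simp
    have hqlen : q.length = p.length - t.length := by
      have := congrArg List.length hq
      simp at this; omega
    have : t <+: s.drop (p.length - t.length) := hqlen ▸ this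
    exact hfirst (p.length - t.length) (by omega) this
  have hcleanu : ∀ p, p <+: u → ¬ t <:+ p := by
    intro p hp
    exact hclean p (hp.trans (List.prefix_append u t0))
  -- LHS: scan s = scan from stack u ++ t0, then one popping step
  have hstep : scanB t (t.getLast ht) (u ++ t0) ([c] ++ v) = scanB t (t.getLast ht) u v := by
    show scanB t (t.getLast ht) (u ++ t0) (c :: v) = scanB t (t.getLast ht) u v
    have hst : (u ++ t0) ++ [c] = u ++ t := by rw [ht0]; simp
    have hcond : ((c == t.getLast ht) &&
        (PySem.List.slice ((u ++ t0) ++ [c]) (some (-(t.length : Int))) none == t)) = true := by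
      rw [popCond_iff t ht, hst]
      exact List.suffix_append u t
    rw [scanB, if_pos hcond]
    congr 1
    have hm : 0 < t.length := htlen
    rw [PySem.List.slice_to_neg_natCast ((u ++ t0) ++ [c]) t.length hm, hst]
    have : (u ++ t).length - t.length = u.length := by simp
    rw [this, List.take_left]
  have lhs : scanB t (t.getLast ht) [] s = scanB t (t.getLast ht) u v := by
    have h1 := scanB_clean t ht (u ++ t0) [] ([c] ++ v) (by simpa using hclean)
    have h2 : s = (u ++ t0) ++ ([c] ++ v) := by rw [hs, ht0]; simp
    rw [h2]
    simpa [hstep] using h1.trans hstep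
  -- RHS
  have rhs : scanB t (t.getLast ht) [] (u ++ v) = scanB t (t.getLast ht) u v := by
    have := scanB_clean t ht u [] v (by simpa using hcleanu)
    simpa using this
  rw [lhs, hvdef, rhs]

-- main per-token equivalence: A's find-and-cut loop = B's stack scan
theorem loopA_eq_scanB (t : List Char) (ht : t ≠ []) :
    ∀ (n : Nat) (s : List Char), s.length ≤ n →
      removeLoopA t (n + 1) s = scanB t (t.getLast ht) [] s := by
  intro n
  induction n with
  | zero =>
    intro s hs
    have hsnil : s = [] := List.eq_nil_of_length_eq_zero (by omega)
    subst hsnil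
    have hfind : PySem.Chars.find [] t = -1 := by
      rw [PySem.Chars.find_eq_neg_one_iff]
      intro h
      exact ht (List.infix_nil.mp h)
    rw [removeLoopA]
    simp only [hfind]
    norm_num
    exact (scanB_no_occ t ht [] (by
      intro h; exact ht (List.infix_nil.mp h))).symm
  | succ m ih =>
    intro s hs
    by_cases hocc : t <:+: s
    · -- find succeeds
      have hfind : 0 ≤ PySem.Chars.find s t := (PySem.Chars.find_nonneg_iff s t).mpr hocc
      set i := PySem.Chars.find s t with hi
      obtain ⟨hpre, hfirst⟩ := PySem.Chars.find_spec (s := s) (sub := t) hfind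
      set k := i.toNat with hk
      have hkle : k ≤ s.length := by
        have := PySem.Chars.find_le_length s t
        omega
      have htle : t.length ≤ s.length - k := by
        have := hpre.length_le
        simpa using this
      have htlen : 0 < t.length := List.length_pos_iff.mpr ht
      have hslice1 : PySem.List.slice s none (some i) = s.take k := by
        rw [PySem.List.slice_to _ hfind]
      have hslice2 : PySem.List.slice s (some (i + (t.length : Int))) none
          = s.drop (k + t.length) := by
        rw [PySem.List.slice_from _ (by omega)]
        congr 1
        omega
      have hcut := scanB_remove_first t ht s k hpre hfirst
      set s' := s.take k ++ s.drop (k + t.length) with hs'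
      have hs'len : s'.length ≤ m := by
        have : s'.length = k + (s.length - (k + t.length)) := by
          simp [hs', hkle]
        omega
      rw [removeLoopA]
      simp only [← hi]
      rw [if_pos (by omega), hslice1, hslice2, ← hs']
      rw [ih s' hs'len, hcut]
    · -- no occurrence: find = -1, loop exits, scan never pops
      have hfind : PySem.Chars.find s t = -1 :=
        (PySem.Chars.find_eq_neg_one_iff s t).mpr hocc
      rw [removeLoopA]
      simp only [hfind]
      norm_num
      exact (scanB_no_occ t ht s hocc).symm

theorem fold_eq (tokens : List String) :
    ∀ cs : List Char, (∀ t ∈ tokens, t ≠ "") →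
      tokens.foldl (fun cs token => removeLoopA token.toList (cs.length + 1) cs) cs
      = tokens.foldl
          (fun cs token =>
            if h : token.toList ≠ [] ∧ PySem.Chars.isIn token.toList cs = true then
              scanB token.toList (token.toList.getLast h.1) [] cs
            else cs)
          cs := by
  induction tokens with
  | nil => intro cs _; rfl
  | cons t rest ih =>
    intro cs h
    have ht : t ≠ "" := h t (by simp)
    have htl : t.toList ≠ [] := by
      intro hnil
      exact ht (String.toList_inj.mp (by simpa using hnil))
    simp only [List.foldl_cons]
    by_cases hin : PySem.Chars.isIn t.toList cs = true
    · rw [dif_pos ⟨htl, hin⟩, loopA_eq_scanB t.toList htl cs.length cs le_rfl]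
      exact ih _ (fun x hx => h x (by simp [hx]))
    · -- token absent: A's loop exits at once, B skips the token
      have hocc : ¬ t.toList <:+: cs := by
        intro hc
        exact hin ((PySem.Chars.isIn_iff_infix t.toList cs).mpr hc)
      have hfind : PySem.Chars.find cs t.toList = -1 :=
        (PySem.Chars.find_eq_neg_one_iff cs t.toList).mpr hocc
      have hA : removeLoopA t.toList (cs.length + 1) cs = cs := by
        rw [removeLoopA]
        simp only [hfind]
        norm_num
      rw [dif_neg (by
        rintro ⟨-, h2⟩
        exact hin h2), hA]
      exact ih _ (fun x hx => h x (by simp [hx]))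

-- ===== VERDICT (by name: the statement is the Claim_ definition above) =====
theorem remove_tokens_spec : Claim_equal_remove_tokens := by
  intro s tokens _ hpre
  unfold Spec_remove_tokens remove_tokens remove_tokens_alt
  rw [fold_eq tokens s.toList hpre]
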